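-- pv_equiv track=rewrite | github.com/wang264/JiuZhangLintcode | DP/L4/564_combination-sum-iv.py | backPackVI
-- ===== SOURCE A (Python) =====
-- def backPackVI(nums, target):
--     # write your code here
--     # f[i] = 有多少种组合能拼出重量i
--     # f[i] = 枚举最后一个包里的物品nums[0], nums[1] ... nums[n-1]。
--     # f[i] = f[i - nums[0]] + f[i - nums[1]] ... + f[i - nums[n-1]]
--
--     f = [None] * (target + 1)
--     f[0] = 1
--     for i in range(1, target + 1):
--         f[i] = 0
--         for j in range(len(nums)):
--             # 如果最后一个物品为j, 有多少种组合能组成 i-nums[j] 的重量。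
--             if i - nums[j] < 0:
--                 continue
--             f[i] += f[i - nums[j]]
--
--     return f[target]
-- ===== SOURCE B (Python) =====
-- def backPackVI(nums, target):
--     # top-down memoized recursion on the remaining weight
--     memo = {0: 1}
--
--     def count(rem):
--         if rem in memo:
--             return memo[rem]
--         total = 0
--         for num in nums:
--             if rem - num >= 0:
--                 total += count(rem - num)
--         memo[rem] = total
--         return total
--
--     return count(target)
-- ===== Notes on version B (the rewrite author's own statement) =====
-- stated objective: alternative
-- what changed: Replaced A's bottom-up table fill (array f[0..target] built in increasing order) by top-down memoized recursion: an inner count(rem) recurses over nums with a dict memo, visiting only reachable subproblems; Pre_ excludes negative targets and, for target>=1, nums with nonpositive entries: A raises IndexError on negative nums, and with 0 in nums the true count is infinite (B recurses forever) so A's finite value is an artefact of its iteration.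
-- outside the precondition, e.g. on backPackVI([1, 0], 1): A returns 2, B raises RecursionError
import Mathlib
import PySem

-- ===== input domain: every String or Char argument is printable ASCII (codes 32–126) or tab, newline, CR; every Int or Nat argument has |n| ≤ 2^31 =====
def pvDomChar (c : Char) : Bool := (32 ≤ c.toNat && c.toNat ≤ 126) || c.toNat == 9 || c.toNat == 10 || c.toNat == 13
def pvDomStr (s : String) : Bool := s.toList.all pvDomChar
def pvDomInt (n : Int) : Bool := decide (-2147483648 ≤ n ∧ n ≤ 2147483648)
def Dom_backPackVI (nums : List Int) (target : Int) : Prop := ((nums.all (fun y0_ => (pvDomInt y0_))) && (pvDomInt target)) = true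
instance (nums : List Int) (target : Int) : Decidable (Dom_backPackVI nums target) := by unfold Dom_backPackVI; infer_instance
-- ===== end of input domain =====

-- B replaces A's bottom-up table fill by top-down memoized recursion on the remaining weight
-- (an inner count(rem) with a dict memo); an alternative decomposition at the same cost.

-- ===== PORT A =====
def backPackVI (nums : List Int) (target : Int) : Int :=
  let f0 : List (Option Int) := List.replicate (target + 1).toNat (none : Option Int)
  let f1 := PySem.List.pySetD f0 0 (some (1 : Int))            -- f[0] = 1
  let f2 := (PySem.List.pyRange 1 (target + 1) 1).foldl (fun f i =>
    let f := PySem.List.pySetD f i (some (0 : Int))            -- f[i] = 0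
    (PySem.List.pyRange 0 (nums.length : Int) 1).foldl (fun f j =>
      let nj := PySem.List.pyGetD nums j 0
      if i - nj < 0 then f                                      -- continue
      else PySem.List.pySetD f i
        (some ((PySem.List.pyGetD f i none).getD 0 +
               (PySem.List.pyGetD f (i - nj) none).getD 0))) f) f1
  (PySem.List.pyGetD f2 target none).getD 0

-- ===== PORT B =====
-- count(rem) of Source B, with the mutated memo dict threaded through explicitly and a fuel
-- parameter making the recursion total (never exhausted on inputs satisfying Pre_).
def countB (nums : List Int) : Nat → Int → PySem.Dict Int Int → Int × PySem.Dict Int Int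
  | 0, _, memo => (0, memo)                                    -- fuel guard only (totalization)
  | fuel + 1, rem, memo =>
    match memo.get? rem with
    | some v => (v, memo)                                      -- if rem in memo: return memo[rem]
    | none =>
      let p := nums.foldl (fun (p : Int × PySem.Dict Int Int) num =>
        if rem - num ≥ 0 then
          let q := countB nums fuel (rem - num) p.2            -- total += count(rem - num)
          (p.1 + q.1, q.2)
        else p) (0, memo)
      (p.1, p.2.insert rem p.1)                                -- memo[rem] = total

def backPackVI_alt (nums : List Int) (target : Int) : Int :=
  (countB nums (target.toNat + 2) target ((PySem.Dict.empty).insert 0 1)).1   -- memo = {0: 1}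

-- ===== PRECONDITION & SPEC =====
-- Pre_ excludes target < 0 (A raises IndexError) and, for target ≥ 1, nums with nonpositive
-- entries: on negative entries A raises IndexError, and with a 0 in nums the true count is
-- infinite (B recurses forever), so the finite value A returns there is an artefact of its
-- inner iteration order.
def Pre_backPackVI (nums : List Int) (target : Int) : Prop :=
  0 ≤ target ∧ (target = 0 ∨ ∀ x ∈ nums, 0 < x)
instance (nums : List Int) (target : Int) : Decidable (Pre_backPackVI nums target) := by
  unfold Pre_backPackVI; infer_instance

def pvWitness_backPackVI : List Int × Int := ([1, 2], 4)

def Spec_backPackVI (nums : List Int) (target : Int) (out : Int) : Prop := out = backPackVI_alt nums target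
instance (nums : List Int) (target : Int) (out : Int) : Decidable (Spec_backPackVI nums target out) := by unfold Spec_backPackVI; infer_instance

-- ===== CLAIM (what is proved, stated in full; the proofs are below) =====
def Claim_equal_backPackVI : Prop := ∀ (nums : List Int) (target : Int), Dom_backPackVI nums target → Pre_backPackVI nums target → Spec_backPackVI nums target (backPackVI nums target)

-- ===== LEMMAS AND PROOFS =====

-- The spec table: gTbl nums k = [g 0, g 1, …, g k], where g i is the number of ordered
-- combinations of elements of nums summing to i (for positive nums).
def gTbl (nums : List Int) : Nat → List Int
  | 0 => [1]
  | k + 1 =>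
    let t := gTbl nums k
    t ++ [nums.foldl (fun a num =>
      a + (if ((k : Int) + 1) - num < 0 then 0
           else PySem.List.pyGetD t (((k : Int) + 1) - num) 0)) 0]

def gval (nums : List Int) (k : Nat) : Int := (gTbl nums k).getD k 0

-- ---- basic facts about gTbl ----

lemma gTbl_length (nums : List Int) (k : Nat) : (gTbl nums k).length = k + 1 := by
  induction k with
  | zero => simp [gTbl]
  | succ k ih => simp [gTbl, ih]

lemma gTbl_succ (nums : List Int) (k : Nat) :
    gTbl nums (k + 1) = gTbl nums k ++
      [nums.foldl (fun a num =>
        a + (if ((k : Int) + 1) - num < 0 then 0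
             else PySem.List.pyGetD (gTbl nums k) (((k : Int) + 1) - num) 0)) 0] := rfl

lemma gTbl_prefix (nums : List Int) (m k : Nat) (h : m ≤ k) : gTbl nums m <+: gTbl nums k := by
  induction k with
  | zero => have : m = 0 := by omega
            subst this; exact List.prefix_refl _
  | succ k ih =>
    rcases Nat.lt_or_ge m (k + 1) with h' | h'
    · exact (ih (by omega)).trans (by rw [gTbl_succ]; exact List.prefix_append _ _)
    · have : m = k + 1 := by omega
      subst this; exact List.prefix_refl _

lemma gTbl_getD_gval (nums : List Int) (k j : Nat) (hj : j ≤ k) :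
    (gTbl nums k).getD j 0 = gval nums j := by
  obtain ⟨t, ht⟩ := gTbl_prefix nums j k hj
  rw [gval, ← ht]
  simp [List.getD, List.getElem?_append_left (show j < (gTbl nums j).length by rw [gTbl_length]; omega)]

lemma pyGetD_gTbl (nums : List Int) (k : Nat) (i : Int) (h0 : 0 ≤ i) (h1 : i ≤ (k : Int)) :
    PySem.List.pyGetD (gTbl nums k) i 0 = gval nums i.toNat := by
  have hlen : i < ((gTbl nums k).length : Int) := by rw [gTbl_length]; push_cast; omega
  rw [PySem.List.pyGetD_eq_getElem _ _ h0 hlen]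
  have hnat : i.toNat < (gTbl nums k).length := by rw [gTbl_length]; omega
  rw [← gTbl_getD_gval nums k i.toNat (by rw [gTbl_length] at hnat; omega)]
  simp [List.getD, List.getElem?_eq_getElem hnat]

lemma gval_zero (nums : List Int) : gval nums 0 = 1 := rfl

lemma gval_succ (nums : List Int) (k : Nat) :
    gval nums (k + 1) = nums.foldl (fun a num =>
      a + (if ((k : Int) + 1) - num < 0 then 0
           else PySem.List.pyGetD (gTbl nums k) (((k : Int) + 1) - num) 0)) 0 := by
  rw [gval, gTbl_succ]
  have hl : (gTbl nums k).length = k + 1 := gTbl_length nums k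
  simp [List.getD, hl]

-- the recurrence in closed (map-sum) form, for positive nums
lemma gval_rec (nums : List Int) (hpos : ∀ x ∈ nums, 0 < x) (k : Nat) :
    gval nums (k + 1) = (nums.map (fun num =>
      if ((k : Int) + 1) - num < 0 then 0
      else gval nums (((k : Int) + 1) - num).toNat)).sum := by
  rw [gval_succ, PySem.List.foldl_add, zero_add]
  congr 1
  apply List.map_congr_left
  intro num hm
  have hn := hpos num hm
  by_cases h : ((k : Int) + 1) - num < 0
  · rw [if_pos h, if_pos h]
  · rw [if_neg h, if_neg h, pyGetD_gTbl nums k _ (by omega) (by omega)]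

-- ---- indexing helpers for the middle cell of "prefix ++ cell :: rest" ----

lemma pyGetD_append_mid {α : Type} (xs : List α) (y : α) (ys : List α) (i : Int) (d : α)
    (hi : i = (xs.length : Int)) : PySem.List.pyGetD (xs ++ y :: ys) i d = y := by
  subst hi
  rw [PySem.List.pyGetD_natCast]
  simp [List.getD]

lemma pySetD_append_mid {α : Type} (xs : List α) (y : α) (ys : List α) (i : Int) (v : α)
    (hi : i = (xs.length : Int)) : PySem.List.pySetD (xs ++ y :: ys) i v = xs ++ v :: ys := by
  subst hi
  rw [PySem.List.pySetD_natCast]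
  simp

lemma mapsome_get (t : List Int) (ys : List (Option Int)) (j : Int) (d : Int)
    (h0 : 0 ≤ j) (h1 : j < (t.length : Int)) :
    (PySem.List.pyGetD (t.map some ++ ys) j none).getD d = PySem.List.pyGetD t j d := by
  have h1' : j < (((t.map some ++ ys)).length : Int) := by
    rw [List.length_append, List.length_map]; push_cast; omega
  rw [PySem.List.pyGetD_eq_getElem _ _ h0 h1', PySem.List.pyGetD_eq_getElem _ _ h0 h1]
  have hn : j.toNat < t.length := by omega
  rw [List.getElem_append_left (by simpa using hn)]
  simp

-- ---- A side ----

lemma innerA (i : Int) (t : List Int) (rest : List (Option Int)) (hi : i = (t.length : Int)) :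
    ∀ (l : List Int), (∀ x ∈ l, 0 < x) → ∀ acc : Int,
    l.foldl (fun f num =>
        if i - num < 0 then f
        else PySem.List.pySetD f i
          (some ((PySem.List.pyGetD f i none).getD 0 +
                 (PySem.List.pyGetD f (i - num) none).getD 0)))
      (t.map some ++ some acc :: rest)
    = t.map some ++
        some (l.foldl (fun a num =>
          a + (if i - num < 0 then 0 else PySem.List.pyGetD t (i - num) 0)) acc) :: rest := by
  intro l
  have hi' : i = (((t.map some) : List (Option Int)).length : Int) := by
    rw [List.length_map]; exact hi
  induction l with
  | nil => intro _ acc; rfl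
  | cons num l ih =>
    intro hpos acc
    have hnum : 0 < num := hpos num (List.mem_cons_self)
    have htail : ∀ x ∈ l, 0 < x := fun x hx => hpos x (List.mem_cons_of_mem _ hx)
    simp only [List.foldl_cons]
    by_cases h : i - num < 0
    · rw [if_pos h, if_pos h, add_zero]
      exact ih htail acc
    · have hge : 0 ≤ i - num := by omega
      have hlt : i - num < (t.length : Int) := by omega
      rw [if_neg h, if_neg h]
      rw [pyGetD_append_mid _ _ _ _ _ hi', pySetD_append_mid _ _ _ _ _ hi',
          mapsome_get t (some acc :: rest) (i - num) 0 hge hlt]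
      simp only [Option.getD_some]
      exact ih htail (acc + PySem.List.pyGetD t (i - num) 0)

lemma innerA_range (i : Int) (t : List Int) (rest : List (Option Int)) (hi : i = (t.length : Int))
    (nums : List Int) (hpos : ∀ x ∈ nums, 0 < x) (acc : Int) :
    (PySem.List.pyRange 0 (nums.length : Int) 1).foldl (fun f j =>
        if i - PySem.List.pyGetD nums j 0 < 0 then f
        else PySem.List.pySetD f i
          (some ((PySem.List.pyGetD f i none).getD 0 +
                 (PySem.List.pyGetD f (i - PySem.List.pyGetD nums j 0) none).getD 0)))
      (t.map some ++ some acc :: rest)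
    = t.map some ++
        some (nums.foldl (fun a num =>
          a + (if i - num < 0 then 0 else PySem.List.pyGetD t (i - num) 0)) acc) :: rest := by
  rw [PySem.List.foldl_pyRange_zero_pyGetD' nums 0 (fun f num =>
      if i - num < 0 then f
      else PySem.List.pySetD f i
        (some ((PySem.List.pyGetD f i none).getD 0 +
               (PySem.List.pyGetD f (i - num) none).getD 0)))]
  exact innerA i t rest hi nums hpos acc

lemma outerA (nums : List Int) (hpos : ∀ x ∈ nums, 0 < x) (T : Nat) (k : Nat) (hk : k ≤ T) :
    (PySem.List.pyRange 1 ((k : Int) + 1) 1).foldl (fun f i =>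
        (PySem.List.pyRange 0 (nums.length : Int) 1).foldl (fun f j =>
            if i - PySem.List.pyGetD nums j 0 < 0 then f
            else PySem.List.pySetD f i
              (some ((PySem.List.pyGetD f i none).getD 0 +
                     (PySem.List.pyGetD f (i - PySem.List.pyGetD nums j 0) none).getD 0)))
          (PySem.List.pySetD f i (some 0)))
      (some 1 :: List.replicate T (none : Option Int))
    = (gTbl nums k).map some ++ List.replicate (T - k) (none : Option Int) := by
  induction k with
  | zero =>
    rw [PySem.List.pyRange_one_eq_nil (show ((0:Nat):Int) + 1 ≤ 1 by norm_num)]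
    simp [gTbl]
  | succ k ih =>
    have hk' : k ≤ T := by omega
    have hcast : ((k + 1 : Nat) : Int) + 1 = ((k : Int) + 1) + 1 := by push_cast; ring
    rw [hcast, PySem.List.pyRange_one_succ_right (by omega : (1:Int) ≤ (k:Int) + 1),
        List.foldl_append, ih hk']
    simp only [List.foldl_cons, List.foldl_nil]
    have hrep : List.replicate (T - k) (none : Option Int)
        = none :: List.replicate (T - (k + 1)) none := by
      rw [← List.replicate_succ]; congr 1; omega
    have hi' : (k : Int) + 1 = (((gTbl nums k).map some).length : Int) := by
      rw [List.length_map, gTbl_length]; push_cast; ring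
    rw [hrep, pySetD_append_mid _ _ _ _ _ hi',
        innerA_range ((k : Int) + 1) (gTbl nums k) _ (by rw [gTbl_length]; push_cast; ring) nums hpos 0]
    rw [gTbl_succ]
    simp

lemma A_val (nums : List Int) (hpos : ∀ x ∈ nums, 0 < x) (T : Nat) :
    backPackVI nums (T : Int) = gval nums T := by
  simp only [backPackVI]
  have h1 : ((T : Int) + 1).toNat = T + 1 := by omega
  rw [h1, List.replicate_succ,
      PySem.List.pySetD_of_nonneg _ _ (by norm_num : (0:Int) ≤ 0)]
  simp only [Int.toNat_zero, List.set_cons_zero]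
  rw [outerA nums hpos T T (le_refl T)]
  simp only [Nat.sub_self, List.replicate_zero]
  rw [mapsome_get (gTbl nums T) [] (T : Int) 0 (by positivity)
        (by rw [gTbl_length]; push_cast; omega),
      pyGetD_gTbl nums T (T : Int) (by positivity) (le_refl _)]
  simp

-- ---- B side: the memo invariant ----

def MemOK (nums : List Int) (memo : PySem.Dict Int Int) : Prop :=
  memo.get? 0 = some 1 ∧ ∀ k v, memo.get? k = some v → 0 ≤ k ∧ v = gval nums k.toNat

lemma memOK_insert (nums : List Int) (memo : PySem.Dict Int Int) (h : MemOK nums memo)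
    (rem : Int) (hrem : 0 < rem) :
    MemOK nums (memo.insert rem (gval nums rem.toNat)) := by
  obtain ⟨h0, hall⟩ := h
  refine ⟨?_, ?_⟩
  · rw [PySem.Dict.get?_insert, if_neg (by omega : ¬ (0:Int) = rem)]; exact h0
  · intro k v hk
    rw [PySem.Dict.get?_insert] at hk
    split_ifs at hk with he
    · cases hk; exact ⟨by omega, by rw [he]⟩
    · exact hall k v hk

lemma countB_spec (nums : List Int) (hpos : ∀ x ∈ nums, 0 < x) :
    ∀ (fuel : Nat) (rem : Int) (memo : PySem.Dict Int Int),
      0 ≤ rem → rem.toNat < fuel → MemOK nums memo →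
      (countB nums fuel rem memo).1 = gval nums rem.toNat ∧
      MemOK nums (countB nums fuel rem memo).2 := by
  intro fuel
  induction fuel with
  | zero => intro rem memo _ hf _; omega
  | succ fuel ihf =>
    intro rem memo hrem hf hmem
    simp only [countB]
    cases hget : memo.get? rem with
    | some v =>
      simp only
      exact ⟨(hmem.2 rem v hget).2, hmem⟩
    | none =>
      have hrem1 : 1 ≤ rem := by
        rcases lt_or_eq_of_le hrem with h | h
        · omega
        · exfalso; rw [← h] at hget; rw [hmem.1] at hget; cases hget
      -- the inner loop: total = acc + Σ over l of the recursive values; memo stays OK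
      have aux : ∀ (l : List Int), (∀ x ∈ l, 0 < x) →
          ∀ (acc : Int) (m : PySem.Dict Int Int), MemOK nums m →
          (l.foldl (fun (p : Int × PySem.Dict Int Int) num =>
              if rem - num ≥ 0 then
                let q := countB nums fuel (rem - num) p.2
                (p.1 + q.1, q.2)
              else p) (acc, m)).1
            = acc + (l.map (fun num =>
                if rem - num < 0 then 0 else gval nums (rem - num).toNat)).sum ∧
          MemOK nums ((l.foldl (fun (p : Int × PySem.Dict Int Int) num =>
              if rem - num ≥ 0 then
                let q := countB nums fuel (rem - num) p.2
                (p.1 + q.1, q.2)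
              else p) (acc, m)).2) := by
        intro l
        induction l with
        | nil =>
          intro _ acc m hm
          simp only [List.foldl_nil, List.map_nil, List.sum_nil]
          exact ⟨(add_zero acc).symm, hm⟩
        | cons num l ihl =>
          intro hp acc m hm
          have hn : 0 < num := hp num List.mem_cons_self
          have ht : ∀ x ∈ l, 0 < x := fun x hx => hp x (List.mem_cons_of_mem _ hx)
          simp only [List.foldl_cons, List.map_cons, List.sum_cons]
          by_cases hc : rem - num ≥ 0
          · rw [if_pos hc]
            have hfc : (rem - num).toNat < fuel := by omega
            obtain ⟨hq1, hq2⟩ := ihf (rem - num) m hc hfc hm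
            obtain ⟨h1, h2⟩ := ihl ht (acc + (countB nums fuel (rem - num) m).1) _ hq2
            refine ⟨?_, h2⟩
            rw [h1, hq1, if_neg (by omega)]
            ring
          · rw [if_neg hc]
            obtain ⟨h1, h2⟩ := ihl ht acc m hm
            refine ⟨?_, h2⟩
            rw [h1, if_pos (by omega)]
            ring
      obtain ⟨h1, h2⟩ := aux nums hpos 0 memo hmem
      simp only
      have hk : rem.toNat = (rem.toNat - 1) + 1 := by omega
      have hsum : (nums.map (fun num =>
          if rem - num < 0 then 0 else gval nums (rem - num).toNat)).sum
          = gval nums rem.toNat := by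
        rw [hk, gval_rec nums hpos (rem.toNat - 1)]
        congr 1
        apply List.map_congr_left
        intro num hmn
        have : ((rem.toNat - 1 : Nat) : Int) + 1 = rem := by omega
        rw [this]
      constructor
      · rw [h1, hsum]; ring
      · rw [h1, zero_add, hsum]
        exact memOK_insert nums _ h2 rem (by omega)

lemma B_val (nums : List Int) (hpos : ∀ x ∈ nums, 0 < x) (T : Nat) :
    backPackVI_alt nums (T : Int) = gval nums T := by
  have hmem0 : MemOK nums ((PySem.Dict.empty).insert 0 1) := by
    constructor
    · rw [PySem.Dict.get?_insert]; simp
    · intro k v hk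
      rw [PySem.Dict.get?_insert] at hk
      split_ifs at hk with he
      · cases hk; subst he; exact ⟨le_refl _, by simp [gval_zero]⟩
      · rw [PySem.Dict.get?_empty] at hk; cases hk
  have := (countB_spec nums hpos ((T : Int).toNat + 2) (T : Int)
      ((PySem.Dict.empty).insert 0 1) (by positivity) (by omega) hmem0).1
  simpa [backPackVI_alt] using this

-- ---- target = 0 ----

lemma A_zero (nums : List Int) : backPackVI nums 0 = 1 := by
  simp [backPackVI, PySem.List.pyRange_one_eq_nil (by norm_num : (1:Int) ≤ 1)]
  rfl

lemma B_zero (nums : List Int) : backPackVI_alt nums 0 = 1 := by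
  simp [backPackVI_alt, countB, PySem.Dict.get?_insert_self]

-- ===== VERDICT (by name: the statement is the Claim_ definition above) =====
theorem backPackVI_spec : Claim_equal_backPackVI := by
  intro nums target _ hpre
  obtain ⟨ht, hcase⟩ := hpre
  unfold Spec_backPackVI
  obtain ⟨T, rfl⟩ := Int.eq_ofNat_of_zero_le ht
  rcases Nat.eq_zero_or_pos T with hT | hT
  · subst hT; simp only [Nat.cast_zero]; rw [A_zero, B_zero]
  · have hpos : ∀ x ∈ nums, 0 < x := by
      rcases hcase with h | h
      · exact absurd (show T = 0 by exact_mod_cast h) (by omega)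
      · exact h
    rw [A_val nums hpos T, B_val nums hpos T]
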